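-- pv_equiv track=rewrite | github.com/FriedemannStud/GameOfLife | generate_setup.py | transform_and_place
-- ===== SOURCE A (Python) =====
-- def transform_and_place(pattern, r_offset, c_offset, rotation=0, mirror=False):
--     """
--     Rotiert und spiegelt ein Muster und verschiebt es an die Zielposition.
--     rotation: 0, 90, 180, 270 (im Uhrzeigersinn)
--     mirror: True = Horizontal spiegeln (c -> -c) vor der Rotation
--     """
--     transformed = []
--     for r, c in pattern:
--         curr_r, curr_c = r, c
--
--         # 1. Mirror (Horizontal Flip: c -> -c)
--         # Dies spiegelt um die Y-Achse des lokalen Ursprungs (0,0)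
--         if mirror:
--             curr_c = -curr_c
--
--         # 2. Rotate (around 0,0)
--         # 90 deg clockwise: (r, c) -> (c, -r)
--         # 180: (r, c) -> (-r, -c)
--         # 270: (r, c) -> (-c, r)
--         if rotation == 90:
--             curr_r, curr_c = curr_c, -curr_r
--         elif rotation == 180:
--             curr_r, curr_c = -curr_r, -curr_c
--         elif rotation == 270:
--             curr_r, curr_c = -curr_c, curr_r
--
--         # 3. Translate
--         final_r = curr_r + r_offset
--         final_c = curr_c + c_offset
--
--         transformed.append((final_r, final_c))
--     return transformed
-- ===== SOURCE B (Python) =====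
-- def transform_and_place(pattern, r_offset, c_offset, rotation=0, mirror=False):
--     # Staged whole-list passes: mirror pass, then repeated 90-degree rotation
--     # passes (k = number of quarter turns), then a translation pass.
--     pts = list(pattern)
--     if mirror:
--         pts = [(r, -c) for r, c in pts]
--     for _ in range({90: 1, 180: 2, 270: 3}.get(rotation, 0)):
--         pts = [(c, -r) for r, c in pts]
--     return [(r + r_offset, c + c_offset) for r, c in pts]
-- ===== Notes on version B (the rewrite author's own statement) =====
-- stated objective: alternative
-- what changed: Replaces the per-point branch on mirror/rotation with staged whole-list passes: an optional mirror pass, then the 90/180/270 rotation performed as 1/2/3 repeated applications of a single quarter-turn map, then a translation pass.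
import Mathlib
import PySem

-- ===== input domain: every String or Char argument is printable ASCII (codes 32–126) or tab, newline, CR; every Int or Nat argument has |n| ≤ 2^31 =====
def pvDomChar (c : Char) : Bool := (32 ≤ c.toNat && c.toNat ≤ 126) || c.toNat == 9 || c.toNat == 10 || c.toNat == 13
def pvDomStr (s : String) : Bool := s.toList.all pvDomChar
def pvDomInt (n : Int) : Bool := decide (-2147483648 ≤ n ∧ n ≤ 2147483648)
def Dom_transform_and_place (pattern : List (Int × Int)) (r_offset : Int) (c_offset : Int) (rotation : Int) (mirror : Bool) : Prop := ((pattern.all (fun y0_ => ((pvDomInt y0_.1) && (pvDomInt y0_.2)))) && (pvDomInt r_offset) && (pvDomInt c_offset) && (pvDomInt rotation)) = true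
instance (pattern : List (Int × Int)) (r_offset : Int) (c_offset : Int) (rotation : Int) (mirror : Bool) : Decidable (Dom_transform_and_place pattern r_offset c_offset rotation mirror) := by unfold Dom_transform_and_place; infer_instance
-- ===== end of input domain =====

-- B restructures A's per-point mirror/rotation branching into staged whole-list passes, with rotation done as repeated quarter turns.


-- ===== PORT A =====
def transform_and_place (pattern : List (Int × Int)) (r_offset : Int) (c_offset : Int) (rotation : Int) (mirror : Bool) : List (Int × Int) :=
  pattern.foldl (fun transformed rc =>
    let r := rc.1
    let c := rc.2
    let curr_r := r
    let curr_c := c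
    let curr_c := if mirror then -curr_c else curr_c
    let rc2 :=
      if rotation == 90 then (curr_c, -curr_r)
      else if rotation == 180 then (-curr_r, -curr_c)
      else if rotation == 270 then (-curr_c, curr_r)
      else (curr_r, curr_c)
    transformed ++ [(rc2.1 + r_offset, rc2.2 + c_offset)]) []

-- ===== PORT B =====
-- {90: 1, 180: 2, 270: 3}.get(rotation, 0)
def pvQuarterTurns (rotation : Int) : Nat :=
  (PySem.Dict.getD (PySem.Dict.ofList [((90 : Int), (1 : Nat)), (180, 2), (270, 3)]) rotation 0)

def transform_and_place_alt (pattern : List (Int × Int)) (r_offset : Int) (c_offset : Int) (rotation : Int) (mirror : Bool) : List (Int × Int) :=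
  let pts := pattern
  let pts := if mirror then pts.map (fun rc => (rc.1, -rc.2)) else pts
  let pts := (List.range (pvQuarterTurns rotation)).foldl
      (fun pts _ => pts.map (fun rc => (rc.2, -rc.1))) pts
  pts.map (fun rc => (rc.1 + r_offset, rc.2 + c_offset))

-- ===== PRECONDITION & SPEC =====
def Spec_transform_and_place (pattern : List (Int × Int)) (r_offset : Int) (c_offset : Int) (rotation : Int) (mirror : Bool) (out : List (Int × Int)) : Prop := out = transform_and_place_alt pattern r_offset c_offset rotation mirror
instance (pattern : List (Int × Int)) (r_offset : Int) (c_offset : Int) (rotation : Int) (mirror : Bool) (out : List (Int × Int)) : Decidable (Spec_transform_and_place pattern r_offset c_offset rotation mirror out) := by unfold Spec_transform_and_place; infer_instance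

-- ===== CLAIM (what is proved, stated in full; the proofs are below) =====
def Claim_equal_transform_and_place : Prop := ∀ (pattern : List (Int × Int)) (r_offset : Int) (c_offset : Int) (rotation : Int) (mirror : Bool), Dom_transform_and_place pattern r_offset c_offset rotation mirror → Spec_transform_and_place pattern r_offset c_offset rotation mirror (transform_and_place pattern r_offset c_offset rotation mirror)

-- ===== LEMMAS AND PROOFS =====
lemma foldl_append_map {α β : Type} (f : α → β) (l : List α) (acc : List β) :
    l.foldl (fun tr x => tr ++ [f x]) acc = acc ++ l.map f := by
  induction l generalizing acc with
  | nil => simp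
  | cons hd tl ih => simp [ih]

lemma pvQuarterTurns_eq (rotation : Int) :
    pvQuarterTurns rotation =
      if rotation = 90 then 1 else if rotation = 180 then 2
      else if rotation = 270 then 3 else 0 := by
  unfold pvQuarterTurns
  split_ifs with h1 h2 h3
  · subst h1; decide
  · subst h2; decide
  · subst h3; decide
  · simp [PySem.Dict.getD, PySem.Dict.ofList, PySem.Dict.get?, PySem.Dict.empty,
      PySem.Dict.update, PySem.Dict.insert, List.find?,
      show ((90 : Int) == rotation) = false by simpa using (Ne.symm h1),
      show ((180 : Int) == rotation) = false by simpa using (Ne.symm h2),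
      show ((270 : Int) == rotation) = false by simpa using (Ne.symm h3)]

-- ===== VERDICT (by name: the statement is the Claim_ definition above) =====
theorem transform_and_place_spec : Claim_equal_transform_and_place := by
  intro pattern r_offset c_offset rotation mirror _
  unfold Spec_transform_and_place transform_and_place transform_and_place_alt
  rw [foldl_append_map, pvQuarterTurns_eq]
  simp only [List.nil_append, beq_iff_eq]
  by_cases h90 : rotation = 90 <;> by_cases h180 : rotation = 180 <;>
    by_cases h270 : rotation = 270 <;>
    simp_all [List.range_succ, List.map_map, Function.comp] <;>
    cases mirror <;> simp [List.map_map, Function.comp]
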